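-- pv_equiv track=rewrite | github.com/mjmcandrew/Coursera_2020 | Bioinformatics2_Spring2020/Func_StringReconstruction.py | deBruijnFromKmers
-- ===== SOURCE A (Python) =====
-- def deBruijnFromKmers(Patterns):
--     deBruijnGraph = {}
--     #Creates the empty dictionary deBruijnGraph.
--     for pattern in Patterns:
--         #Iterates through patterns in the input 'Patterns'.
--         k_length = len(pattern)
--         #Sets k_length equal to the length of the pattern.
--         suffix = pattern[1:]
--         #Sets the variable 'suffix' equal to the second through final character in the string 'pattern'.
--         prefix = pattern[0: k_length - 1]
--         #Sets the variable 'prefix' equal to the first through the penultimate character in the string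
--         #'pattern'.
--         if prefix not in deBruijnGraph:
--             deBruijnGraph[prefix] = []
--             #Creates an empty list as a value assigned to the key for the specified prefix.
--             deBruijnGraph[prefix].append(suffix)
--             #Adds the pattern's suffix to the list value associated with this prefix key.
--         else:
--             deBruijnGraph[prefix].append(suffix)
--             #If the prefix key already exists in the dictionary, this simply appends the suffix that follows.
--     return deBruijnGraph
-- ===== SOURCE B (Python) =====
-- def deBruijnFromKmers(Patterns):
--     # Different algorithm: no dict is grown while scanning. Build the
--     # (prefix, suffix) pair list once, collect the distinct prefixes in
--     # first-occurrence order with a plain list, then gather each key's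
--     # suffixes by a filtering scan over the pair list.
--     pairs = [(p[:-1], p[1:]) for p in Patterns]
--     keys = []
--     for pre, _ in pairs:
--         if pre not in keys:
--             keys.append(pre)
--     return {pre: [suf for q, suf in pairs if q == pre] for pre in keys}
-- ===== Notes on version B (the rewrite author's own statement) =====
-- stated objective: alternative
-- what changed: A grows a hash dict in a single pass, testing membership and mutating the value list per k-mer; B uses no dict at all: it builds the (prefix,suffix) pair list, collects distinct prefixes in first-occurrence order by list membership, and gathers each key's suffixes with a per-key filtering scan (nested scans instead of hashed accumulation).
import Mathlib
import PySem

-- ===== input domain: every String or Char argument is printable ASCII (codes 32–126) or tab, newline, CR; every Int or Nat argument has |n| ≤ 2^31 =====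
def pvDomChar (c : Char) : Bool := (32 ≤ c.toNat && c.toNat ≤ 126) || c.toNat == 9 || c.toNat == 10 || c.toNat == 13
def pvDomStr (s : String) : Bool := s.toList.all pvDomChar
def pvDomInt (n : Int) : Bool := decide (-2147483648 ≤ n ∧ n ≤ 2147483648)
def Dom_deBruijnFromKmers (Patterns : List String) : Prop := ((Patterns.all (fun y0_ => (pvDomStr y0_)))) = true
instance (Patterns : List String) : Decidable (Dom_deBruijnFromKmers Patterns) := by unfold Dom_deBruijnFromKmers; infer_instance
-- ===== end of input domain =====

-- B drops A's grow-a-dict loop entirely: it collects distinct prefixes by list membership and gathers each key's suffixes by a filtering scan (alternative algorithm, same result, no speed claim).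


-- ===== PORT A =====
def deBruijnFromKmers (Patterns : List String) : List (String × List String) :=
  (Patterns.foldl (fun d pattern =>
      let k_length : Int := PySem.Str.len pattern
      let suffix : String := PySem.Str.slice pattern (some 1) none
      let pref : String := PySem.Str.slice pattern (some 0) (some (k_length - 1))
      if d.contains pref = false then
        (d.insert pref []).modify pref [] (fun l => l ++ [suffix])
      else
        d.modify pref [] (fun l => l ++ [suffix]))
    PySem.Dict.empty).items

-- ===== PORT B =====
def deBruijnFromKmers_alt (Patterns : List String) : List (String × List String) :=
  let pairs : List (String × String) :=
    Patterns.map (fun p => (PySem.Str.slice p none (some (-1)), PySem.Str.slice p (some 1) none))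
  let keys : List String :=
    pairs.foldl (fun ks pr => if ks.contains pr.1 then ks else ks ++ [pr.1]) []
  keys.map (fun pre => (pre, (pairs.filter (fun q => q.1 == pre)).map (fun q => q.2)))

-- ===== PRECONDITION & SPEC =====
def Spec_deBruijnFromKmers (Patterns : List String) (out : List (String × List String)) : Prop := out = deBruijnFromKmers_alt Patterns
instance (Patterns : List String) (out : List (String × List String)) : Decidable (Spec_deBruijnFromKmers Patterns out) := by unfold Spec_deBruijnFromKmers; infer_instance

-- ===== CLAIM =====
def Claim_equal_deBruijnFromKmers : Prop := ∀ (Patterns : List String), Dom_deBruijnFromKmers Patterns → Spec_deBruijnFromKmers Patterns (deBruijnFromKmers Patterns)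

-- ===== LEMMAS AND PROOFS =====

-- A's prefix slice pattern[0:len-1] equals B's pattern[:-1].
lemma prefix_slice_eq (p : String) :
    PySem.Str.slice p (some 0) (some (PySem.Str.len p - 1)) = PySem.Str.slice p none (some (-1)) := by
  simp only [PySem.Str.slice, PySem.Str.len]
  congr 1
  simp only [PySem.Chars.slice_eq_listSlice]
  rw [PySem.List.slice_zero_start]
  generalize p.toList = l
  rcases l with _ | ⟨c, cs⟩
  · rfl
  · have hlen : ((c :: cs).length : Int) - 1 = ((cs.length : Nat) : Int) := by simp
    rw [hlen, PySem.List.slice_to_natCast]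
    have h1 : PySem.List.slice (c :: cs) none (some (-1)) = (c :: cs).dropLast :=
      PySem.List.slice_to_neg_one (c :: cs)
    rw [h1, List.dropLast_eq_take]
    simp

-- overwriting a just-appended key is the same as inserting once
lemma insert_insert_self (d : PySem.Dict String (List String)) (k : String)
    (v₀ v : List String) (h : d.contains k = false) :
    (d.insert k v₀).insert k v = d.insert k v := by
  apply PySem.Dict.ext
  rw [PySem.Dict.items_insert_of_contains _ _ (PySem.Dict.contains_insert_self d k v₀),
      PySem.Dict.items_insert_of_not_contains _ _ h,
      PySem.Dict.items_insert_of_not_contains _ _ h, List.map_append]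
  have hid : d.items.map (fun p => if (p.1 == k) = true then (k, v) else p) = d.items.map id := by
    apply List.map_congr_left
    intro p hp
    have hk : p.1 ≠ k := by
      intro hEq
      have : d.contains k = true := by
        rw [PySem.Dict.contains_iff_mem_keys]
        simpa [PySem.Dict.keys, hEq] using List.mem_map_of_mem (f := Prod.fst) hp
      simp [this] at h
    simp [hk]
  rw [hid, List.map_id]; simp

-- A's two branches are both 'modify pref [] (· ++ [suffix])'
lemma step_eq (d : PySem.Dict String (List String)) (pre suf : String) :
    (if d.contains pre = false then
        (d.insert pre []).modify pre [] (fun l => l ++ [suf])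
      else d.modify pre [] (fun l => l ++ [suf]))
    = d.modify pre [] (fun l => l ++ [suf]) := by
  by_cases h : d.contains pre = false
  · simp only [h, if_true, PySem.Dict.modify]
    rw [PySem.Dict.getD_insert_self, PySem.Dict.getD_of_not_contains d [] h,
        insert_insert_self d pre [] _ h]
  · simp [h]

-- a dict with nodup keys is the map of getD over its keys
lemma items_eq_map_keys (d : PySem.Dict String (List String)) (h : d.keys.Nodup) :
    d.keys.map (fun k => (k, d.getD k [])) = d.items := by
  show (d.items.map Prod.fst).map (fun k => (k, d.getD k [])) = d.items
  rw [List.map_map]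
  have hid : d.items.map ((fun k => (k, d.getD k [])) ∘ Prod.fst) = d.items.map id := by
    apply List.map_congr_left
    intro p hp
    have := PySem.Dict.getD_of_mem_items d (k := p.1) (v := p.2) (by simpa using hp) h []
    simp [Function.comp, this]
  rw [hid, List.map_id]

-- A's dict loop, characterised: keys in first-occurrence order, each key its filtered suffixes
lemma a_char (pairs : List (String × String)) :
    (pairs.foldl (fun d pr => d.modify pr.1 [] (fun l => l ++ [pr.2])) PySem.Dict.empty).items
      = (PySem.Set.ofList (pairs.map (fun pr => pr.1))).map
          (fun k => (k, (pairs.filter (fun pr => pr.1 == k)).map (fun pr => pr.2))) := by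
  set D := pairs.foldl (fun d pr => d.modify pr.1 [] (fun l => l ++ [pr.2])) PySem.Dict.empty with hD
  have hkeys : D.keys = PySem.Set.ofList (pairs.map (fun pr => pr.1)) := by
    rw [hD, PySem.Dict.keys_foldl_modify_key pairs (fun pr => pr.1) [] (fun _ pr l => l ++ [pr.2]),
        PySem.Dict.keys_empty]
    rfl
  have hnodup : D.keys.Nodup := by
    rw [hD]
    exact PySem.Dict.nodup_keys_foldl_modify_key pairs (fun pr => pr.1) []
      (fun _ pr l => l ++ [pr.2]) PySem.Dict.empty (by simp [PySem.Dict.keys_empty])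
  rw [← items_eq_map_keys D hnodup, hkeys]
  apply List.map_congr_left
  intro k _
  rw [hD, PySem.Dict.getD_foldl_modify_append pairs PySem.Dict.empty k]
  simp [PySem.Dict.getD_empty]

-- B's membership-and-append loop builds exactly set(·) in first-occurrence order
lemma b_keys_eq (pairs : List (String × String)) :
    pairs.foldl (fun ks pr => if ks.contains pr.1 then ks else ks ++ [pr.1]) []
      = PySem.Set.ofList (pairs.map (fun pr => pr.1)) := by
  rw [PySem.Set.ofList_eq_foldl, List.foldl_map]
  rfl

-- ===== VERDICT =====
theorem deBruijnFromKmers_spec : Claim_equal_deBruijnFromKmers := by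
  intro Patterns _
  show deBruijnFromKmers Patterns = deBruijnFromKmers_alt Patterns
  unfold deBruijnFromKmers deBruijnFromKmers_alt
  set pairs : List (String × String) :=
    Patterns.map (fun p => (PySem.Str.slice p none (some (-1)), PySem.Str.slice p (some 1) none)) with hpairs
  -- rewrite A's loop as a modify-fold over the pair list
  have hloop : Patterns.foldl (fun d pattern =>
      let k_length : Int := PySem.Str.len pattern
      let suffix : String := PySem.Str.slice pattern (some 1) none
      let pref : String := PySem.Str.slice pattern (some 0) (some (k_length - 1))
      if d.contains pref = false then
        (d.insert pref []).modify pref [] (fun l => l ++ [suffix])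
      else
        d.modify pref [] (fun l => l ++ [suffix])) PySem.Dict.empty
      = pairs.foldl (fun d pr => d.modify pr.1 [] (fun l => l ++ [pr.2])) PySem.Dict.empty := by
    rw [hpairs, List.foldl_map]
    apply PySem.List.foldl_congr_mem
    intro d p _
    simp only [prefix_slice_eq, step_eq]
  rw [hloop, a_char pairs]
  show (PySem.Set.ofList (pairs.map (fun pr => pr.1))).map
      (fun k => (k, (pairs.filter (fun pr => pr.1 == k)).map (fun pr => pr.2)))
    = (pairs.foldl (fun ks pr => if ks.contains pr.1 then ks else ks ++ [pr.1]) []).map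
      (fun pre => (pre, (pairs.filter (fun q => q.1 == pre)).map (fun q => q.2)))
  rw [b_keys_eq pairs]
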